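-- pv_equiv track=rewrite | github.com/chehualiu/helloworld01 | 持续监控_v2.0_20240415.py | barsAccum
-- ===== SOURCE A (Python) =====
-- def barsAccum(l):
--     acc = []
--     # ttl = 0
--     for num in l:
--         if len(acc)>0 and acc[-1]<0 and num > 0:
--             acc.append(num)
--             # ttl = 1
--         elif len(acc)>0 and acc[-1]>0 and num > 0:
--             acc.append(acc[-1] + num)
--         elif len(acc)>0 and acc[-1]>0 and num < 0:
--             acc.append(num)
--         elif len(acc)>0 and acc[-1]<0 and num < 0:
--             acc.append(acc[-1] + num)
--         else:
--             acc.append(num)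
--             # ttl = 1
--     return(acc)
-- ===== SOURCE B (Python) =====
-- def _sign(x):
--     return 1 if x > 0 else (-1 if x < 0 else 0)
--
-- def _cumsum(g):
--     t = 0
--     res = []
--     for v in g:
--         t += v
--         res.append(t)
--     return res
--
-- def barsAccum(l):
--     # phase 1: split into maximal runs of equal strict sign
--     runs = []
--     for x in l:
--         if runs and _sign(runs[-1][-1]) == _sign(x):
--             runs[-1].append(x)
--         else:
--             runs.append([x])
--     # phase 2: running sums within each run, flattened
--     out = []
--     for g in runs:
--         out.extend(_cumsum(g))
--     return out
-- ===== Notes on version B (the rewrite author's own statement) =====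
-- stated objective: alternative
-- what changed: Replaces A's five-branch loop that inspects acc[-1] with a two-phase decomposition: first group the input into maximal same-strict-sign runs, then emit the running sums of each run.
import Mathlib
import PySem

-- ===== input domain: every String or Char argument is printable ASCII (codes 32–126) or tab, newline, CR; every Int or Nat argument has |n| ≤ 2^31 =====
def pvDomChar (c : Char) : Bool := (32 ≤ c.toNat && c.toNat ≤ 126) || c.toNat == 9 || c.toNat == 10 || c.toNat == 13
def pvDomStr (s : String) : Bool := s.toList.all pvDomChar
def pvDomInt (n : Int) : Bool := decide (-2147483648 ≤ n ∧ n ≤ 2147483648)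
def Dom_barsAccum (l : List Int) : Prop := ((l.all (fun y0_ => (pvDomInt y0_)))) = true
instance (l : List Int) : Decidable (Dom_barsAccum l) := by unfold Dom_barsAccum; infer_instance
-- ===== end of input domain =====

-- B is an alternative decomposition (group into same-sign runs, then running sums per run); same return value everywhere, no speed claim.

-- ===== PORT A =====
-- Python's last-element access under a len(acc)>0 guard: PySem.List.pyGet? at index minus one, defaulted (never taken when the guard holds)
def pvLastD (xs : List Int) : Int := (PySem.List.pyGet? xs (-1)).getD 0

def pvAStep (acc : List Int) (num : Int) : List Int :=
  if 0 < acc.length ∧ pvLastD acc < 0 ∧ 0 < num then acc ++ [num]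
  else if 0 < acc.length ∧ 0 < pvLastD acc ∧ 0 < num then acc ++ [pvLastD acc + num]
  else if 0 < acc.length ∧ 0 < pvLastD acc ∧ num < 0 then acc ++ [num]
  else if 0 < acc.length ∧ pvLastD acc < 0 ∧ num < 0 then acc ++ [pvLastD acc + num]
  else acc ++ [num]

def barsAccum (l : List Int) : List Int := l.foldl pvAStep []

-- ===== PORT B =====
def pvSign (x : Int) : Int := if 0 < x then 1 else if x < 0 then -1 else 0

-- Python: t = 0; res = []; for v in g: t += v; res.append(t)
def pvCumsum (g : List Int) : List Int :=
  (g.foldl (fun (p : Int × List Int) v => (p.1 + v, p.2 ++ [p.1 + v])) ((0 : Int), ([] : List Int))).2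

-- Python: if runs nonempty and the last run's last element has sign(x): append x to the last run, else start a fresh one-element run
-- (mutation of the last run rendered as structural recursion to the last element)
def pvPushRun (runs : List (List Int)) (x : Int) : List (List Int) :=
  match runs with
  | [] => [[x]]
  | [g] => if pvSign (pvLastD g) = pvSign x then [g ++ [x]] else [g, [x]]
  | g :: gs => g :: pvPushRun gs x

def barsAccum_alt (l : List Int) : List Int :=
  (l.foldl pvPushRun []).foldl (fun out g => out ++ pvCumsum g) []

-- ===== PRECONDITION & SPEC =====
def Spec_barsAccum (l : List Int) (out : List Int) : Prop := out = barsAccum_alt l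
instance (l : List Int) (out : List Int) : Decidable (Spec_barsAccum l out) := by unfold Spec_barsAccum; infer_instance

-- ===== CLAIM (what is proved, stated in full; the proofs are below) =====
def Claim_equal_barsAccum : Prop := ∀ (l : List Int), Dom_barsAccum l → Spec_barsAccum l (barsAccum l)

-- ===== LEMMAS AND PROOFS =====

-- reference function: running total t (0 = "no run"), reset on sign change
def pvStep (t x : Int) : Int := if (0 < x ∧ 0 < t) ∨ (x < 0 ∧ t < 0) then t + x else x

def pvRef (t : Int) : List Int → List Int
  | [] => []
  | x :: xs => pvStep t x :: pvRef (pvStep t x) xs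

theorem pvLastD_append (xs : List Int) (a : Int) : pvLastD (xs ++ [a]) = a := by
  simp [pvLastD, PySem.List.pyGet?, PySem.List.pyIdx?]

theorem pvAStep_eq (acc : List Int) (x : Int) :
    pvAStep acc x = acc ++ [pvStep (pvLastD acc) x] := by
  cases acc with
  | nil => simp [pvAStep, pvStep, pvLastD, PySem.List.pyGet?, PySem.List.pyIdx?]
  | cons a as =>
    simp only [pvAStep, pvStep, List.length_cons]
    split_ifs <;> first | rfl | (exfalso; omega)

theorem barsAccum_loop (l : List Int) : ∀ acc, l.foldl pvAStep acc = acc ++ pvRef (pvLastD acc) l := by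
  induction l with
  | nil => intro acc; simp [pvRef]
  | cons x xs ih =>
    intro acc
    rw [List.foldl_cons, pvAStep_eq, ih, pvLastD_append, pvRef]
    simp

-- B side
def pvCgo (t : Int) : List Int → List Int
  | [] => []
  | x :: xs => (t + x) :: pvCgo (t + x) xs

theorem pvCumsum_go (g : List Int) : ∀ (t : Int) (out : List Int),
    (g.foldl (fun (p : Int × List Int) v => (p.1 + v, p.2 ++ [p.1 + v])) (t, out)).2 = out ++ pvCgo t g := by
  induction g with
  | nil => intro t out; simp [pvCgo]
  | cons x xs ih => intro t out; simp [List.foldl_cons, ih, pvCgo]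

theorem pvCumsum_eq (g : List Int) : pvCumsum g = pvCgo 0 g := by
  simp [pvCumsum, pvCumsum_go]

def pvF (runs : List (List Int)) : List Int := (runs.map pvCumsum).flatten

def pvT (runs : List (List Int)) : Int := (runs.getLast?.getD []).sum

def pvInv (runs : List (List Int)) : Prop :=
  match runs.getLast? with
  | none => True
  | some g => g ≠ [] ∧ ((0 < pvLastD g ∧ 0 < g.sum) ∨ (pvLastD g < 0 ∧ g.sum < 0) ∨ (pvLastD g = 0 ∧ g.sum = 0))

theorem pvCgo_append (g : List Int) : ∀ t x, pvCgo t (g ++ [x]) = pvCgo t g ++ [t + g.sum + x] := by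
  induction g with
  | nil => intro t x; simp [pvCgo]
  | cons a as ih => intro t x; simp [pvCgo, ih, add_assoc]

theorem pvLastD_single (a : Int) : pvLastD [a] = a := by
  simp [pvLastD, PySem.List.pyGet?, PySem.List.pyIdx?]

theorem pvPushRun_ne_nil (rs : List (List Int)) (x : Int) : pvPushRun rs x ≠ [] := by
  cases rs with
  | nil => simp [pvPushRun]
  | cons g gs =>
    cases gs with
    | nil => simp only [pvPushRun]; split_ifs <;> simp
    | cons a b => simp [pvPushRun]

theorem pv_getLast?_cons_ne (g : List Int) (rs : List (List Int)) (h : rs ≠ []) :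
    (g :: rs).getLast? = rs.getLast? := by
  cases rs with
  | nil => exact absurd rfl h
  | cons a l => simp [List.getLast?_cons_cons]

theorem pvSign_eq_iff (a b : Int) :
    pvSign a = pvSign b ↔ ((0 < a ∧ 0 < b) ∨ (a < 0 ∧ b < 0) ∨ (a = 0 ∧ b = 0)) := by
  unfold pvSign
  split_ifs <;> constructor <;> intro h <;> simp_all <;> omega

theorem pvPush_lemma (runs : List (List Int)) (x : Int) (h : pvInv runs) :
    pvF (pvPushRun runs x) = pvF runs ++ [pvStep (pvT runs) x] ∧
    pvInv (pvPushRun runs x) ∧ pvT (pvPushRun runs x) = pvStep (pvT runs) x := by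
  induction runs with
  | nil =>
    refine ⟨?_, ?_, ?_⟩ <;>
      simp [pvPushRun, pvF, pvT, pvInv, pvCumsum_eq, pvCgo, pvStep, pvLastD_single]
    all_goals omega
  | cons g gs ih =>
    cases gs with
    | nil =>
      obtain ⟨hne, hsgn⟩ := by simpa [pvInv] using h
      by_cases hc : pvSign (pvLastD g) = pvSign x
      · rw [pvSign_eq_iff] at hc
        have hs : pvStep g.sum x = g.sum + x := by unfold pvStep; split_ifs <;> omega
        refine ⟨?_, ?_, ?_⟩ <;>
          simp [pvPushRun, hc, pvSign_eq_iff, pvF, pvT, pvInv, pvCumsum_eq, pvCgo_append,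
            pvLastD_append, hs]
        all_goals omega
      · have hc' : ¬ ((0 < pvLastD g ∧ 0 < x) ∨ (pvLastD g < 0 ∧ x < 0) ∨ (pvLastD g = 0 ∧ x = 0)) := by
          rw [← pvSign_eq_iff]; exact hc
        have hs : pvStep g.sum x = x := by unfold pvStep; split_ifs <;> omega
        refine ⟨?_, ?_, ?_⟩ <;>
          simp [pvPushRun, hc, pvF, pvT, pvInv, pvCumsum_eq, pvCgo, pvLastD_single, hs]
        all_goals omega
    | cons g2 gs2 =>
      have h2 : pvInv (g2 :: gs2) := by simpa [pvInv, List.getLast?_cons_cons] using h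
      obtain ⟨h1, hInv, hT⟩ := ih h2
      have hne : pvPushRun (g2 :: gs2) x ≠ [] := pvPushRun_ne_nil _ _
      refine ⟨?_, ?_, ?_⟩
      · simp [pvPushRun, pvF] at h1 ⊢
        simp [h1, pvT, List.getLast?_cons_cons]
      · simp only [pvPushRun, pvInv, pv_getLast?_cons_ne _ _ hne]
        simpa [pvInv] using hInv
      · simp only [pvPushRun, pvT, pv_getLast?_cons_ne _ _ hne, List.getLast?_cons_cons]
        simpa [pvT] using hT

theorem barsAccum_alt_loop (l : List Int) : ∀ runs, pvInv runs →
    pvF (l.foldl pvPushRun runs) = pvF runs ++ pvRef (pvT runs) l := by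
  induction l with
  | nil => intro runs _; simp [pvRef]
  | cons x xs ih =>
    intro runs h
    obtain ⟨h1, hInv, hT⟩ := pvPush_lemma runs x h
    rw [List.foldl_cons, ih _ hInv, h1, hT, pvRef]
    simp

theorem pvEmit_eq (runs : List (List Int)) : ∀ out, runs.foldl (fun out g => out ++ pvCumsum g) out = out ++ pvF runs := by
  induction runs with
  | nil => intro out; simp [pvF]
  | cons g gs ih => intro out; simp [List.foldl_cons, ih, pvF]

-- ===== VERDICT (by name: the statement is the Claim_ definition above) =====
theorem barsAccum_spec : Claim_equal_barsAccum := by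
  intro l _
  unfold Spec_barsAccum barsAccum barsAccum_alt
  rw [barsAccum_loop l [], pvEmit_eq, barsAccum_alt_loop l [] (by simp [pvInv])]
  simp [pvF, pvT, pvLastD, PySem.List.pyGet?, PySem.List.pyIdx?]
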